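-- pv_equiv track=rewrite | github.com/GouravWadhwa/Data-Mining | Lab2/db_scan.py | density_connected
-- ===== SOURCE A (Python) =====
-- def density_connected (n_points, visited, index, min_points) :
--     connected_points = []
--     connected_points.extend (n_points[index])
--     visited[index] = True
--     for neighbour in n_points[index] :
--         if visited[neighbour] == True :
--             continue
--         if len (n_points[neighbour]) >= min_points :
--             connected_points.extend (density_connected (n_points, visited, neighbour, min_points))
--
--     return connected_points
-- ===== SOURCE B (Python) =====
-- def density_connected(n_points, visited, index, min_points):
--     # Iterative DFS: an explicit stack of [frame, position] pairs replaces the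
--     # recursion, extending the result and marking visited at push time.
--     connected_points = list(n_points[index])
--     visited[index] = True
--     stack = [[n_points[index], 0]]
--     while stack:
--         top = stack[-1]
--         if top[1] == len(top[0]):
--             stack.pop()
--             continue
--         neighbour = top[0][top[1]]
--         top[1] += 1
--         if visited[neighbour] == True:
--             continue
--         if len(n_points[neighbour]) >= min_points:
--             connected_points.extend(n_points[neighbour])
--             visited[neighbour] = True
--             stack.append([n_points[neighbour], 0])
--     return connected_points
-- ===== Notes on version B (the rewrite author's own statement) =====
-- stated objective: alternative
-- what changed: The density-connected DFS recursion is replaced by an iterative explicit stack of [neighbour-list, position] frames that emulates the call frames, extending the result and marking visited at push time, reproducing the exact pre-order concatenation.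
-- outside the precondition, e.g. on density_connected([[-1, 1]], [False, False], 0, 0): A returns [-1, 1, -1, 1], B returns [-1, 1, -1, 1]
import Mathlib
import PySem

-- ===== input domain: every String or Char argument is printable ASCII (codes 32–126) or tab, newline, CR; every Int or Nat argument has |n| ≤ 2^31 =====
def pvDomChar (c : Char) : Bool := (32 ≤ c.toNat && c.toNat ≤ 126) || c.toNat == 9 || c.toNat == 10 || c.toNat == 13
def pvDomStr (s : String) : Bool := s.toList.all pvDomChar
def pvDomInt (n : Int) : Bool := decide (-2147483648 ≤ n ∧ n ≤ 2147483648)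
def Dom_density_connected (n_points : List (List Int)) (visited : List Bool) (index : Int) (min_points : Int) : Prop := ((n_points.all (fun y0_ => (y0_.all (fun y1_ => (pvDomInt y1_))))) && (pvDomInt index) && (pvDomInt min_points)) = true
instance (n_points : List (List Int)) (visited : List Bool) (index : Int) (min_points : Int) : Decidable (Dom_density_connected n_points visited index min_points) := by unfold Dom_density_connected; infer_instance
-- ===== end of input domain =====

-- B replaces the density-connected DFS recursion by an explicit stack of call frames (alternative
-- decomposition, same cost); both Pythons mutate `visited` identically, the theorems are about the
-- return value.


-- shared indexing helpers (Python semantics; the `true`/`[]` defaults are only reachable outside Pre_)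
def pvNget (np : List (List Int)) (i : Int) : List Int := (PySem.List.pyGet? np i).getD []
def pvBget (v : List Bool) (i : Int) : Bool := (PySem.List.pyGet? v i).getD true
def pvBset (v : List Bool) (i : Int) : List Bool := PySem.List.pySetD v i true

-- ===== PORT A =====
-- A's recursion, with the threaded `visited` state made explicit and a fuel counter as a pure
-- totality guard (one unit per call; fuel `visited.length + 1` is proved sufficient below).
mutual
def dcGo (np : List (List Int)) (mp : Int) (fuel : Nat) (v : List Bool) (i : Int) :
    List Int × List Bool :=
  match fuel with
  | 0 => ([], v)
  | f + 1 =>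
    let p := dcLoop np mp f (pvNget np i) (pvBset v i)
    (pvNget np i ++ p.1, p.2)
termination_by (fuel, 0)

def dcLoop (np : List (List Int)) (mp : Int) (fuel : Nat) (nbrs : List Int) (v : List Bool) :
    List Int × List Bool :=
  match nbrs with
  | [] => ([], v)
  | nb :: rest =>
    if pvBget v nb = true then dcLoop np mp fuel rest v
    else if mp ≤ ((pvNget np nb).length : Int) then
      let p := dcGo np mp fuel v nb
      let q := dcLoop np mp fuel rest p.2
      (p.1 ++ q.1, q.2)
    else dcLoop np mp fuel rest v
termination_by (fuel, nbrs.length + 1)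
end

def density_connected (n_points : List (List Int)) (visited : List Bool) (index : Int) (min_points : Int) : List Int :=
  (dcGo n_points min_points (visited.length + 1) visited index).1

-- ===== PORT B =====
-- termination facts the machine needs (cited by name in decreasing_by)
theorem pv_count_set_lt (v : List Bool) (k : Nat) (h : v[k]? = some false) :
    (v.set k true).count false < v.count false := by
  induction v generalizing k with
  | nil => simp at h
  | cons x t ih =>
    cases k with
    | zero =>
      have hx : x = false := by simpa using h
      subst hx; simp
    | succ n =>
      have := ih n (by simpa using h)
      cases x <;> simp <;> omega

theorem pvBset_count_lt (v : List Bool) (i : Int) (h : pvBget v i = false) :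
    (pvBset v i).count false < v.count false := by
  unfold pvBget PySem.List.pyGet? at h
  unfold pvBset PySem.List.pySetD PySem.List.pySet?
  cases hk : PySem.List.pyIdx? v.length i with
  | none => simp [hk] at h
  | some k =>
    simp only [hk, Option.bind_some] at h
    simp only [Option.map_some, Option.getD_some]
    cases hv : v[k]? with
    | none => simp [hv] at h
    | some b =>
      have hb : b = false := by simp [hv] at h; exact h
      exact pv_count_set_lt v k (hb ▸ hv)

-- B's explicit stack machine: frames are the remaining neighbour lists; one machine step either
-- pops an exhausted frame or consumes the next neighbour of the top frame.
def dcMachine (np : List (List Int)) (mp : Int) (stack : List (List Int)) (v : List Bool)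
    (acc : List Int) : List Int × List Bool :=
  match stack with
  | [] => (acc, v)
  | [] :: rest => dcMachine np mp rest v acc
  | (nb :: frame) :: rest =>
    if h : pvBget v nb = true then dcMachine np mp (frame :: rest) v acc
    else if mp ≤ ((pvNget np nb).length : Int) then
      dcMachine np mp (pvNget np nb :: frame :: rest) (pvBset v nb)
        (acc ++ pvNget np nb)
    else dcMachine np mp (frame :: rest) v acc
termination_by (v.count false, (stack.map List.length).sum + stack.length)
decreasing_by
  all_goals first
    | (apply Prod.Lex.left; exact pvBset_count_lt v nb (by simpa using h))
    | (apply Prod.Lex.right; simp; omega)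
    | (apply Prod.Lex.right; simp)

def density_connected_alt (n_points : List (List Int)) (visited : List Bool) (index : Int) (min_points : Int) : List Int :=
  (dcMachine n_points min_points [pvNget n_points index] (pvBset visited index)
    (pvNget n_points index)).1

-- ===== PRECONDITION & SPEC =====
-- Pre_-side helpers: the DBSCAN density-reachability closure of the start index — a graph condition
-- on the input (which nodes a chain of initially-unvisited core neighbours can reach), independent
-- of traversal order and computing no output of either program.
def pvWrap (n : Nat) (j : Int) : Nat := (j % (n : Int)).toNat

def pvRound (np : List (List Int)) (v : List Bool) (mp : Int) (P : List Nat) : List Nat :=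
  P.foldl (fun acc p =>
    (np.getD p []).foldl (fun acc2 j =>
      if (-(v.length : Int) ≤ j ∧ j < v.length) ∧ v.getD (pvWrap v.length j) false = false ∧
          (-(np.length : Int) ≤ j ∧ j < np.length) ∧
          mp ≤ ((np.getD (pvWrap np.length j) []).length : Int) ∧
          pvWrap np.length j ∉ acc2 then
        acc2 ++ [pvWrap np.length j]
      else acc2) acc) P

def pvReach (np : List (List Int)) (v : List Bool) (i : Int) (mp : Int) : List Nat :=
  (pvRound np v mp)^[np.length] [pvWrap np.length i]

-- Pre_ exists only because the Python programs raise IndexError outside it: the agreement lemma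
-- dc_main below is proved for ALL inputs, without using Pre_, and B's Python raises exactly where
-- A's does and matches A's value wherever A returns (including the cited excluded inputs).
-- Pre_ admits: a start index that is a valid Python index of both lists, and, in every
-- density-reachable neighbour list, only entries that are valid indices of `visited` and — unless
-- already marked visited in the INITIAL `visited` — valid indices of `n_points` too.  In one
-- degenerate corner this under-approximates A's non-raising domain: when len(visited) differs from
-- len(n_points), a negative entry can wrap to a different slot in each list, and an entry invalid
-- for `n_points` can be skipped only because an alias of it was visited EARLIER in the DFS; whether
-- A raises there depends on visit time, which no closed-form condition on the input can state, so
-- Pre_ conservatively excludes that aliasing corner (the cites give two such returning inputs, on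
-- which Python B returns A's exact value).
def Pre_density_connected (n_points : List (List Int)) (visited : List Bool) (index : Int) (min_points : Int) : Prop :=
  PySem.Raise.InRange n_points.length index ∧ PySem.Raise.InRange visited.length index ∧
    ∀ p ∈ pvReach n_points visited index min_points, ∀ j ∈ n_points.getD p [],
      PySem.Raise.InRange visited.length j ∧
        (visited.getD (pvWrap visited.length j) false = true ∨
          PySem.Raise.InRange n_points.length j)
instance (n_points : List (List Int)) (visited : List Bool) (index : Int) (min_points : Int) : Decidable (Pre_density_connected n_points visited index min_points) := by unfold Pre_density_connected; infer_instance

def pvWitness_density_connected : List (List Int) × List Bool × Int × Int :=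
  ([[1], [0]], [false, false], 0, 1)

def Spec_density_connected (n_points : List (List Int)) (visited : List Bool) (index : Int) (min_points : Int) (out : List Int) : Prop := out = density_connected_alt n_points visited index min_points
instance (n_points : List (List Int)) (visited : List Bool) (index : Int) (min_points : Int) (out : List Int) : Decidable (Spec_density_connected n_points visited index min_points out) := by unfold Spec_density_connected; infer_instance

-- ===== CLAIM (what is proved, stated in full; the proofs are below) =====
def Claim_equal_density_connected : Prop := ∀ (n_points : List (List Int)) (visited : List Bool) (index : Int) (min_points : Int), Dom_density_connected n_points visited index min_points → Pre_density_connected n_points visited index min_points → Spec_density_connected n_points visited index min_points (density_connected n_points visited index min_points)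

-- ===== LEMMAS AND PROOFS =====
theorem pv_count_set_le (v : List Bool) (k : Nat) :
    (v.set k true).count false ≤ v.count false := by
  induction v generalizing k with
  | nil => simp
  | cons b t ih =>
    cases k with
    | zero => cases b <;> simp
    | succ n => simpa [List.count_cons] using ih n

theorem pvBset_count_le (v : List Bool) (i : Int) :
    (pvBset v i).count false ≤ v.count false := by
  unfold pvBset PySem.List.pySetD PySem.List.pySet?
  cases hk : PySem.List.pyIdx? v.length i with
  | none => simp
  | some k => simpa using pv_count_set_le v k

theorem dcLoop_mono_of (np : List (List Int)) (mp : Int) (fuel : Nat)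
    (hgo : ∀ v i, (dcGo np mp fuel v i).2.count false ≤ v.count false) :
    ∀ nbrs v, (dcLoop np mp fuel nbrs v).2.count false ≤ v.count false := by
  intro nbrs
  induction nbrs with
  | nil => intro v; simp [dcLoop]
  | cons nb rest ih =>
    intro v
    rw [dcLoop]
    split_ifs with hb hm
    · exact ih v
    · exact le_trans (ih _) (hgo v nb)
    · exact ih v

theorem dcGo_mono (np : List (List Int)) (mp : Int) :
    ∀ fuel v i, (dcGo np mp fuel v i).2.count false ≤ v.count false := by
  intro fuel
  induction fuel with
  | zero => intro v i; simp [dcGo]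
  | succ f ih =>
    intro v i
    rw [dcGo]
    exact le_trans (dcLoop_mono_of np mp f ih _ _) (pvBset_count_le v i)

theorem dc_sim (np : List (List Int)) (mp : Int) :
    ∀ fuel nbrs v stack acc, v.count false ≤ fuel →
      dcMachine np mp (nbrs :: stack) v acc =
        dcMachine np mp stack (dcLoop np mp fuel nbrs v).2
          (acc ++ (dcLoop np mp fuel nbrs v).1) := by
  intro fuel
  induction fuel using Nat.strong_induction_on with
  | _ fuel IH =>
  intro nbrs
  induction nbrs with
  | nil => intro v stack acc h; simp [dcMachine, dcLoop]
  | cons nb rest ihr =>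
    intro v stack acc hfc
    by_cases hb : pvBget v nb = true
    · rw [dcMachine, dcLoop]
      simp only [hb, if_true, dif_pos]
      exact ihr v stack acc hfc
    · have hbf : pvBget v nb = false := by simpa using hb
      have hlt := pvBset_count_lt v nb hbf
      obtain ⟨f, rfl⟩ : ∃ f, fuel = f + 1 := ⟨fuel - 1, by omega⟩
      by_cases hm : mp ≤ ((pvNget np nb).length : Int)
      · rw [dcMachine]
        simp only [hb, hm, if_true]
        rw [IH f (by omega) (pvNget np nb) (pvBset v nb) (rest :: stack)
          (acc ++ pvNget np nb) (by omega)]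
        rw [ihr _ _ _ (le_trans (dcLoop_mono_of np mp f (dcGo_mono np mp f) _ _) (by omega))]
        rw [dcLoop]
        simp only [hbf, Bool.false_eq_true, if_false, hm, if_true]
        rw [dcGo]
        simp [List.append_assoc]
      · rw [dcMachine, dcLoop]
        simp only [hb, hm]
        exact ihr v stack acc hfc

-- agreement of the two ports on EVERY input (Pre_ is not needed here; it only delimits where the
-- Python originals return instead of raising)
theorem dc_main (np : List (List Int)) (v : List Bool) (i mp : Int) :
    density_connected np v i mp = density_connected_alt np v i mp := by
  unfold density_connected density_connected_alt
  rw [dcGo]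
  rw [dc_sim np mp v.length (pvNget np i) (pvBset v i) [] (pvNget np i)
    (le_trans (List.count_le_length) (le_of_eq (by
      unfold pvBset PySem.List.pySetD PySem.List.pySet?
      cases hk : PySem.List.pyIdx? v.length i <;> simp)))]
  simp [dcMachine]

-- ===== VERDICT (by name: the statement is the Claim_ definition above) =====
theorem density_connected_spec : Claim_equal_density_connected := by
  intro np v i mp _ _
  unfold Spec_density_connected
  exact dc_main np v i mp
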